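-- pv_equiv track=rewrite | github.com/khris/woodcut | src/woodcut/strategies/genetic_group_preserving.py | _calculate_grouping_score
-- ===== SOURCE A (Python) =====
-- from collections import defaultdict
--
-- def _calculate_grouping_score(pieces):
--     """그룹화 점수 계산"""
--     if not pieces:
--         return 0
--
--     # 같은 크기 조각들의 연속성 체크
--     groups = defaultdict(list)
--     for i, piece in enumerate(pieces):
--         groups[piece['original']].append(i)
--
--     score = 0
--     for original, indices in groups.items():
--         if len(indices) <= 1:
--             continue
--         # 연속된 조각들에 보너스
--         for i in range(len(indices) - 1):
--             if indices[i+1] - indices[i] == 1: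
--                 score += 1  # 연속 보너스
--
--     return score
-- ===== SOURCE B (Python) =====
-- def _calculate_grouping_score(pieces):
--     """그룹화 점수 계산"""
--     return sum(1 for a, b in zip(pieces, pieces[1:])
--                if a['original'] == b['original'])
-- ===== Notes on version B (the rewrite author's own statement) =====
-- stated objective: simpler
-- what changed: Replaced the build-groups-of-indices-then-count-consecutive-indices-per-group strategy with a single direct scan over adjacent pairs, counting positions where neighbouring pieces share the same 'original'.
import Mathlib
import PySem

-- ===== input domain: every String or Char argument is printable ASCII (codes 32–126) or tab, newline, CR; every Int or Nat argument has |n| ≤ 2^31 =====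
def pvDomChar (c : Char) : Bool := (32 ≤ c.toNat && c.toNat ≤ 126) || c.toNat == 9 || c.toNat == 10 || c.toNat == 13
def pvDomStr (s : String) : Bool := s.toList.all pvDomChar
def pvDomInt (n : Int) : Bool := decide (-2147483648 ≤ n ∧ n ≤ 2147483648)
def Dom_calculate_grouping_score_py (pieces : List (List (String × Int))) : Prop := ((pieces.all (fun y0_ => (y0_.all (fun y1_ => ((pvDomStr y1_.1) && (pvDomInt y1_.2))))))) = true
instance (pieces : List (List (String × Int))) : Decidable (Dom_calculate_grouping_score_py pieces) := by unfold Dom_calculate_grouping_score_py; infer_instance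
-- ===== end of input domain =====

-- B replaces A's group-indices-per-original-then-count-consecutive-indices strategy by one direct adjacent-pair sweep; same values wherever A returns.

-- ===== PORT A =====

-- piece['original'] (a missing key is a KeyError, excluded by Pre_; getD's default is never read under Pre_)
def pvOriginal (piece : List (String × Int)) : Int :=
  (PySem.Dict.mk piece).getD "original" 0

-- groups = defaultdict(list); for i, piece in enumerate(pieces): groups[piece['original']].append(i)
def pvGroups (pieces : List (List (String × Int))) : PySem.Dict Int (List Int) :=
  (PySem.List.enumerate pieces).foldl
    (fun d p => d.modify (pvOriginal p.2) [] (fun l => l ++ [p.1])) PySem.Dict.empty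

-- for i in range(len(indices) - 1): if indices[i+1] - indices[i] == 1: score += 1
def pvGroupLoop (score : Int) (indices : List Int) : Int :=
  (PySem.List.pyRange 0 ((indices.length : Int) - 1) 1).foldl
    (fun s i =>
      if PySem.List.pyGetD indices (i + 1) 0 - PySem.List.pyGetD indices i 0 = 1 then s + 1 else s)
    score

def calculate_grouping_score_py (pieces : List (List (String × Int))) : Int :=
  if pieces = [] then 0
  else
    (pvGroups pieces).items.foldl
      (fun score kv => if (kv.2.length : Int) ≤ 1 then score else pvGroupLoop score kv.2) 0

-- ===== PORT B =====
def calculate_grouping_score_py_alt (pieces : List (List (String × Int))) : Int :=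
  (pieces.zip (PySem.List.slice pieces (some 1) none)).foldl
    (fun s p => if pvOriginal p.1 = pvOriginal p.2 then s + 1 else s) 0

-- ===== PRECONDITION & SPEC =====
-- Pre_ excludes exactly the inputs where some piece lacks the key 'original': there Python A raises KeyError.
def Pre_calculate_grouping_score_py (pieces : List (List (String × Int))) : Prop :=
  ∀ piece ∈ pieces, (PySem.Dict.mk piece).contains "original" = true
instance (pieces : List (List (String × Int))) : Decidable (Pre_calculate_grouping_score_py pieces) := by
  unfold Pre_calculate_grouping_score_py; infer_instance

def pvWitness_calculate_grouping_score_py : (List (List (String × Int))) :=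
  [[("original", 1)], [("original", 1)], [("original", 2)]]

def Spec_calculate_grouping_score_py (pieces : List (List (String × Int))) (out : Int) : Prop := out = calculate_grouping_score_py_alt pieces
instance (pieces : List (List (String × Int))) (out : Int) : Decidable (Spec_calculate_grouping_score_py pieces out) := by unfold Spec_calculate_grouping_score_py; infer_instance

-- ===== CLAIM (what is proved, stated in full; the proofs are below) =====
def Claim_equal_calculate_grouping_score_py : Prop := ∀ (pieces : List (List (String × Int))), Dom_calculate_grouping_score_py pieces → Pre_calculate_grouping_score_py pieces → Spec_calculate_grouping_score_py pieces (calculate_grouping_score_py pieces)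

-- ===== LEMMAS AND PROOFS =====

-- number of adjacent pairs of l whose difference is exactly 1 (A's inner loop, structurally)
def adjDiff1 : List Int → Int
  | a :: b :: t => (if b - a = 1 then 1 else 0) + adjDiff1 (b :: t)
  | _ => 0

-- number of adjacent equal pairs (B's sweep, structurally)
def adjEq : List Int → Int
  | a :: b :: t => (if a = b then 1 else 0) + adjEq (b :: t)
  | _ => 0

-- positions (counted from offset s) of the occurrences of k in ks
def posFrom (ks : List Int) (k : Int) (s : Int) : List Int :=
  match ks with
  | [] => []
  | a :: t => (if a = k then [s] else []) ++ posFrom t k (s + 1)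

lemma adjDiff1_short (l : List Int) (h : l.length ≤ 1) : adjDiff1 l = 0 := by
  match l with
  | [] => rfl
  | [a] => rfl
  | a :: b :: t => simp at h

lemma adjDiff1_map_add_one (l : List Int) : adjDiff1 (l.map (· + 1)) = adjDiff1 l := by
  induction l with
  | nil => rfl
  | cons a t ih =>
    cases t with
    | nil => rfl
    | cons b t' =>
      simp only [List.map_cons, adjDiff1] at *
      rw [ih]
      have : b + 1 - (a + 1) = b - a := by ring
      rw [this]

lemma posFrom_shift (ks : List Int) (k : Int) : ∀ s : Int,
    posFrom ks k (s + 1) = (posFrom ks k s).map (· + 1) := by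
  induction ks with
  | nil => intro s; rfl
  | cons a t ih =>
    intro s
    simp only [posFrom, List.map_append, ih (s + 1)]
    congr 1
    split <;> simp

lemma posFrom_ge (ks : List Int) (k : Int) : ∀ (s : Int) (x : Int), x ∈ posFrom ks k s → s ≤ x := by
  induction ks with
  | nil => intro s x hx; simp [posFrom] at hx
  | cons a t ih =>
    intro s x hx
    simp only [posFrom, List.mem_append] at hx
    rcases hx with hx | hx
    · split at hx <;> simp at hx; omega
    · have := ih (s + 1) x hx; omega

lemma posFrom_head (ks : List Int) (k : Int) (s : Int) :
    (posFrom ks k s).head? = some s ↔ ks.head? = some k := by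
  cases ks with
  | nil => simp [posFrom]
  | cons a t =>
    simp only [posFrom, List.head?_cons]
    by_cases h : a = k
    · simp [h]
    · simp only [if_neg h, List.nil_append]
      constructor
      · intro hh
        exfalso
        have hmem : s ∈ posFrom t k (s + 1) := by
          cases hq : posFrom t k (s + 1) with
          | nil => rw [hq] at hh; simp at hh
          | cons q qs =>
              rw [hq] at hh
              simp only [List.head?_cons, Option.some.injEq] at hh
              rw [← hh]
              exact List.mem_cons_self
        have := posFrom_ge t k (s + 1) s hmem
        omega
      · intro hh; simp at hh; exact absurd hh h

lemma posFrom_of_not_mem (ks : List Int) (k : Int) (h : k ∉ ks) : ∀ s, posFrom ks k s = [] := by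
  induction ks with
  | nil => intro s; rfl
  | cons a t ih =>
    intro s
    simp only [List.mem_cons, not_or] at h
    simp only [posFrom, if_neg (fun hh : a = k => h.1 hh.symm), List.nil_append]
    exact ih h.2 (s + 1)

-- adjDiff1 of 0 consed to a list of entries ≥ 1
lemma adjDiff1_cons_zero (q : List Int) (hq : ∀ x ∈ q, 1 ≤ x) :
    adjDiff1 (0 :: q) = (if q.head? = some 1 then 1 else 0) + adjDiff1 q := by
  cases q with
  | nil => simp [adjDiff1]
  | cons b t =>
    by_cases hb : b = 1
    · simp [adjDiff1, hb]
    · simp [adjDiff1, hb]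

-- index-sum form of A's inner count, by induction on the list
lemma sum_adj : ∀ (l : List Int),
    ((List.range (l.length - 1)).map
      (fun i => if l.getD (i + 1) 0 - l.getD i 0 = 1 then (1 : Int) else 0)).sum = adjDiff1 l
  | [] => by simp [adjDiff1]
  | [a] => by simp [adjDiff1]
  | a :: b :: t => by
    have hlen : (a :: b :: t).length - 1 = t.length + 1 := by simp
    rw [hlen, List.range_succ_eq_map, List.map_cons, List.sum_cons, List.map_map]
    have htail : ((List.range t.length).map
        ((fun i => if (a :: b :: t).getD (i + 1) 0 - (a :: b :: t).getD i 0 = 1 then (1 : Int) else 0) ∘ Nat.succ)).sum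
        = ((List.range ((b :: t).length - 1)).map
        (fun i => if (b :: t).getD (i + 1) 0 - (b :: t).getD i 0 = 1 then (1 : Int) else 0)).sum := by
      have hl : (b :: t).length - 1 = t.length := by simp
      rw [hl]
      congr 1
    rw [htail, sum_adj (b :: t)]
    simp [adjDiff1, List.getD]

-- A's inner loop = accumulator + adjDiff1
lemma loop_sum (l : List Int) (s : Int) : pvGroupLoop s l = s + adjDiff1 l := by
  cases l with
  | nil =>
    simp [pvGroupLoop, adjDiff1]
  | cons a t =>
    unfold pvGroupLoop
    have hn : (((a :: t).length : Int) - 1) = ((t.length : Nat) : Int) := by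
      simp [List.length_cons]
    rw [hn, PySem.List.pyRange_zero_natCast, List.foldl_map]
    have hb : (fun (s : Int) (i : Nat) =>
        if PySem.List.pyGetD (a :: t) ((i : Int) + 1) 0 - PySem.List.pyGetD (a :: t) (i : Int) 0 = 1
        then s + 1 else s)
        = fun (s : Int) (i : Nat) => s +
            (if (a :: t).getD (i + 1) 0 - (a :: t).getD i 0 = 1 then (1 : Int) else 0) := by
      funext s i
      have h1 : ((i : Int) + 1) = ((i + 1 : Nat) : Int) := by push_cast; ring
      rw [h1, PySem.List.pyGetD_natCast, PySem.List.pyGetD_natCast]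
      split <;> ring
    rw [hb, PySem.List.foldl_add]
    congr 1
    have := sum_adj (a :: t)
    simpa using this

-- the dict-building loop, characterised
lemma build_getD (xs : List (List (String × Int))) : ∀ (s : Int) (d : PySem.Dict Int (List Int)) (k : Int),
    ((PySem.List.enumerate xs s).foldl
        (fun d p => d.modify (pvOriginal p.2) [] (fun l => l ++ [p.1])) d).getD k []
      = d.getD k [] ++ posFrom (xs.map pvOriginal) k s := by
  induction xs with
  | nil => intro s d k; simp [PySem.List.enumerate_nil, posFrom]
  | cons x xs ih =>
    intro s d k
    rw [PySem.List.enumerate_cons, List.foldl_cons, ih (s + 1)]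
    simp only [List.map_cons, posFrom]
    rw [PySem.Dict.getD_modify]
    by_cases h : k = pvOriginal x
    · simp [h, List.append_assoc]
    · have h' : ¬ pvOriginal x = k := fun hh => h hh.symm
      simp [if_neg h, if_neg h']

lemma groups_getD (pieces : List (List (String × Int))) (k : Int) :
    (pvGroups pieces).getD k [] = posFrom (pieces.map pvOriginal) k 0 := by
  unfold pvGroups
  rw [build_getD pieces 0 PySem.Dict.empty k]
  simp

lemma groups_keys (pieces : List (List (String × Int))) :
    (pvGroups pieces).keys = PySem.Set.ofList (pieces.map pvOriginal) := by
  unfold pvGroups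
  rw [PySem.Dict.keys_foldl_modify_key, PySem.Dict.keys_empty, PySem.Set.update_nil_left]
  congr 1
  rw [show (fun p : Int × List (String × Int) => pvOriginal p.2)
        = pvOriginal ∘ (fun p : Int × List (String × Int) => p.2) from rfl,
      ← List.map_map, PySem.List.map_snd_enumerate]

lemma groups_keys_nodup (pieces : List (List (String × Int))) :
    (pvGroups pieces).keys.Nodup := by
  rw [groups_keys]; exact PySem.Set.nodup_ofList _

-- the key combinatorial fact: summing consecutive-index bonuses over all groups
-- counts exactly the adjacent equal pairs
lemma main_sum (ks : List Int) :
    ∑ k ∈ ks.toFinset, adjDiff1 (posFrom ks k 0) = adjEq ks := by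
  induction ks with
  | nil => simp [adjEq]
  | cons a t ih =>
    have hshift : ∀ k, posFrom t k (0 + 1) = (posFrom t k 0).map (· + 1) := fun k => posFrom_shift t k 0
    have hF_ne : ∀ k, k ≠ a → adjDiff1 (posFrom (a :: t) k 0) = adjDiff1 (posFrom t k 0) := by
      intro k hk
      simp only [posFrom, if_neg (fun hh : a = k => hk hh.symm), List.nil_append]
      rw [hshift k, adjDiff1_map_add_one]
    have hF_a : adjDiff1 (posFrom (a :: t) a 0)
        = (if t.head? = some a then 1 else 0) + adjDiff1 (posFrom t a 0) := by
      have hpos : posFrom (a :: t) a 0 = 0 :: posFrom t a (0 + 1) := by simp [posFrom]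
      rw [hpos]
      have hge : ∀ x ∈ posFrom t a (0 + 1), 1 ≤ x := by
        intro x hx; have := posFrom_ge t a (0 + 1) x hx; omega
      rw [adjDiff1_cons_zero _ hge]
      have hhead : ((posFrom t a (0 + 1)).head? = some 1) ↔ (t.head? = some a) := by
        have := posFrom_head t a (0 + 1)
        norm_num at this ⊢
        exact this
      rw [hshift a, adjDiff1_map_add_one]
      congr 1
      rw [← hshift a]
      by_cases hh : t.head? = some a
      · rw [if_pos (hhead.mpr hh), if_pos hh]
      · rw [if_neg (fun hc => hh (hhead.mp hc)), if_neg hh]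
    have hadjEq : adjEq (a :: t) = (if t.head? = some a then 1 else 0) + adjEq t := by
      cases t with
      | nil => simp [adjEq]
      | cons b t' =>
        simp only [adjEq, List.head?_cons, Option.some.injEq]
        by_cases hb : b = a
        · simp [hb]
        · have hb' : ¬ a = b := fun hc => hb hc.symm
          simp [hb, hb']
    rw [List.toFinset_cons, hadjEq, ← ih]
    by_cases hmem : a ∈ t.toFinset
    · rw [Finset.insert_eq_self.mpr hmem]
      rw [← Finset.add_sum_erase _ _ hmem, ← Finset.add_sum_erase _ (fun k => adjDiff1 (posFrom t k 0)) hmem]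
      have herase : ∑ k ∈ t.toFinset.erase a, adjDiff1 (posFrom (a :: t) k 0)
          = ∑ k ∈ t.toFinset.erase a, adjDiff1 (posFrom t k 0) := by
        apply Finset.sum_congr rfl
        intro k hk
        exact hF_ne k (Finset.ne_of_mem_erase hk)
      rw [herase, hF_a]
      ring
    · rw [Finset.sum_insert hmem]
      have hnot : a ∉ t := fun hc => hmem (List.mem_toFinset.mpr hc)
      have hFa0 : adjDiff1 (posFrom (a :: t) a 0) = 0 := by
        have hpos : posFrom (a :: t) a 0 = 0 :: posFrom t a (0 + 1) := by simp [posFrom]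
        rw [hpos, posFrom_of_not_mem t a hnot (0 + 1)]
        rfl
      have hhead0 : ¬ t.head? = some a := by
        intro hc
        cases t with
        | nil => simp at hc
        | cons b t' => simp at hc; exact hnot (hc ▸ List.mem_cons_self)
      have hsum : ∑ k ∈ t.toFinset, adjDiff1 (posFrom (a :: t) k 0)
          = ∑ k ∈ t.toFinset, adjDiff1 (posFrom t k 0) := by
        apply Finset.sum_congr rfl
        intro k hk
        exact hF_ne k (fun hc => hnot (hc ▸ List.mem_toFinset.mp hk))
      rw [hFa0, hsum, if_neg hhead0]

-- A computes adjEq of the key sequence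
lemma A_eq (pieces : List (List (String × Int))) :
    calculate_grouping_score_py pieces = adjEq (pieces.map pvOriginal) := by
  by_cases hp : pieces = []
  · subst hp; rfl
  · unfold calculate_grouping_score_py
    rw [if_neg hp]
    rw [PySem.Dict.items_eq_map_keys (pvGroups pieces) (groups_keys_nodup pieces) ([] : List Int)]
    rw [List.foldl_map]
    have hb : (fun (score : Int) (k : Int) =>
        if (((pvGroups pieces).getD k []).length : Int) ≤ 1 then score
        else pvGroupLoop score ((pvGroups pieces).getD k []))
        = fun (score : Int) (k : Int) => score + adjDiff1 ((pvGroups pieces).getD k []) := by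
      funext score k
      split
      · rename_i hle
        rw [adjDiff1_short _ (by exact_mod_cast hle)]
        ring
      · exact loop_sum _ _
    rw [hb, PySem.List.foldl_add, zero_add]
    have hmap : ((pvGroups pieces).keys.map fun k => adjDiff1 ((pvGroups pieces).getD k [])).sum
        = ((PySem.Set.ofList (pieces.map pvOriginal)).map
            (fun k => adjDiff1 (posFrom (pieces.map pvOriginal) k 0))).sum := by
      rw [groups_keys]
      congr 1
      apply List.map_congr_left
      intro k _
      rw [groups_getD]
    rw [hmap]
    -- sum over the ordered set = Finset sum
    have hfin : ((PySem.Set.ofList (pieces.map pvOriginal)).map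
          (fun k => adjDiff1 (posFrom (pieces.map pvOriginal) k 0))).sum
        = ∑ k ∈ (pieces.map pvOriginal).toFinset,
            adjDiff1 (posFrom (pieces.map pvOriginal) k 0) := by
      rw [← List.sum_toFinset _ (PySem.Set.nodup_ofList (pieces.map pvOriginal))]
      apply Finset.sum_congr _ (fun _ _ => rfl)
      apply Finset.ext
      intro x
      simp [PySem.Set.mem_ofList]
    rw [hfin, main_sum]

-- B computes adjEq of the key sequence
lemma B_eq (pieces : List (List (String × Int))) :
    calculate_grouping_score_py_alt pieces = adjEq (pieces.map pvOriginal) := by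
  unfold calculate_grouping_score_py_alt
  rw [PySem.List.slice_from_one]
  have : ∀ (xs : List (List (String × Int))) (s : Int),
      (xs.zip xs.tail).foldl (fun s p => if pvOriginal p.1 = pvOriginal p.2 then s + 1 else s) s
        = s + adjEq (xs.map pvOriginal) := by
    intro xs
    induction xs with
    | nil => intro s; simp [adjEq]
    | cons a t ih =>
      intro s
      cases t with
      | nil => simp [adjEq]
      | cons b t' =>
        simp only [List.tail_cons, List.zip_cons_cons, List.foldl_cons, List.map_cons, adjEq]
        have := ih (if pvOriginal a = pvOriginal b then s + 1 else s)
        simp only [List.tail_cons, List.map_cons] at this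
        rw [this]
        split <;> ring
  simpa using this pieces 0

-- ===== VERDICT (by name: the statement is the Claim_ definition above) =====
theorem calculate_grouping_score_py_spec : Claim_equal_calculate_grouping_score_py := by
  intro pieces _ _
  unfold Spec_calculate_grouping_score_py
  rw [A_eq, B_eq]
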